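-- pv_equiv track=rewrite | github.com/official-notfishvr/Cracks-Keygen-for-stuff | Binary Ninja/KeyGen/keygen.py | search_pattern_operand_locations
-- ===== SOURCE A (Python) =====
-- def search_pattern_operand_locations(binary, pattern_instrs, max_gap):
--     n = len(binary)
--     first_instr = pattern_instrs[0]
--     plen = len(first_instr)
--
--     i = 0
--     while i <= n - plen:
--         operand_locations = []
--         match = True
--
--         instr_locs = []
--         for j in range(plen):
--             if first_instr[j] is None:
--                 instr_locs.append(i + j)
--             else:
--                 if binary[i + j] != first_instr[j]:
--                     match = False
--                     break
--
--         if not match: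
--             i += 1
--             continue
--
--         operand_locations.append(instr_locs)
--         last_pos = i
--
--         for instr in pattern_instrs[1:]:
--             instr_len = len(instr)
--             found = False
--
--             search_limit = min(last_pos + 1 + max_gap, n - instr_len + 1)
--
--             for k in range(last_pos + 1, search_limit):
--                 sub_match = True
--                 instr_locs = []
--
--                 for l in range(instr_len):
--                     if instr[l] is None:
--                         instr_locs.append(k + l)
--                     else:
--                         if binary[k + l] != instr[l]:
--                             sub_match = False
--                             break
--
--                 if sub_match:
--                     operand_locations.append(instr_locs)
--                     last_pos = k
--                     found = True
--                     break
--
--             if not found: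
--                 match = False
--                 break
--
--         if match:
--             return i, operand_locations
--
--         i += 1
--
--     return None, None
-- ===== SOURCE B (Python) =====
-- def search_pattern_operand_locations(binary, pattern_instrs, max_gap):
--     n = len(binary)
--
--     def match_at(instr, pos):
--         # operand (wildcard) locations if instr matches at pos, else None
--         locs = []
--         for off, want in enumerate(instr):
--             if want is None:
--                 locs.append(pos + off)
--             elif binary[pos + off] != want:
--                 return None
--         return locs
--
--     def match_from(instrs, lo, hi):
--         # greedily place each remaining instruction at the first matching
--         # position of its window [lo, hi), committing without backtracking
--         if not instrs:
--             return []
--         instr = instrs[0]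
--         for k in range(lo, min(hi, n - len(instr) + 1)):
--             locs = match_at(instr, k)
--             if locs is not None:
--                 tail = match_from(instrs[1:], k + 1, k + 1 + max_gap)
--                 return None if tail is None else [locs] + tail
--         return None
--
--     plen = len(pattern_instrs[0])
--     for start in range(n - plen + 1):
--         ops = match_from(pattern_instrs, start, start + 1)
--         if ops is not None:
--             return start, ops
--     return None, None
-- ===== Notes on version B (the rewrite author's own statement) =====
-- stated objective: simpler
-- what changed: Replaces A's duplicated first-vs-subsequent matching loops by one match_at helper and one recursive greedy placer match_from(instrs, lo, hi) that treats the anchored first instruction as the degenerate window [start, start+1), removing the inline while/flag/break machinery.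
import Mathlib
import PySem

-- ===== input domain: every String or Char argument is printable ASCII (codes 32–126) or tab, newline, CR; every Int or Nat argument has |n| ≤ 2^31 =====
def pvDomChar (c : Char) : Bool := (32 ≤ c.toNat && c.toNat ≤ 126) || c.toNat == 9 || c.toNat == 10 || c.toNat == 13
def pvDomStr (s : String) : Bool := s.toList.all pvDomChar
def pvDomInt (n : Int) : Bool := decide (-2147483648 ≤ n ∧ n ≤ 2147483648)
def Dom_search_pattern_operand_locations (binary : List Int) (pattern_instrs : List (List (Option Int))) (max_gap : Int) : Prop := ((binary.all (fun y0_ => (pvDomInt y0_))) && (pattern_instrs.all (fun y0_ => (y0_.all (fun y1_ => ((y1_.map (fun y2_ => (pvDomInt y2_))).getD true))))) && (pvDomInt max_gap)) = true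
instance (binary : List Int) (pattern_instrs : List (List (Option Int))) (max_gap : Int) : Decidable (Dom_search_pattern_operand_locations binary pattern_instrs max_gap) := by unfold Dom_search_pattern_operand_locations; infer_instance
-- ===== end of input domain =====

-- B unifies A's duplicated first-vs-subsequent instruction matching into one helper and one
-- recursive greedy placer over windows; objective: simpler (same asymptotic cost).

-- ===== PORT A =====
-- inner 'for j' loop of A (both copies have the same body): returns (instr_locs, match flag);
-- on a mismatch A breaks, so the accumulated list is discarded by the caller (flag = false).
-- binary[pos] is ported with pyGet?; inside Pre_ the index is always in range (exact there).
def pvA_scan (binary : List Int) (instr : List (Option Int)) (pos : Int) : List Int × Bool :=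
  match instr with
  | [] => ([], true)
  | c :: rest =>
    match c with
    | none =>
      let r := pvA_scan binary rest (pos + 1)
      (pos :: r.1, r.2)
    | some v =>
      if PySem.List.pyGet? binary pos = some v then pvA_scan binary rest (pos + 1)
      else ([], false)

-- A's 'for k in range(last_pos+1, search_limit)' loop with its break
def pvA_findK (binary : List Int) (instr : List (Option Int)) : List Int → Option (Int × List Int)
  | [] => none
  | k :: ks =>
    let r := pvA_scan binary instr k
    if r.2 then some (k, r.1) else pvA_findK binary instr ks

-- A's 'for instr in pattern_instrs[1:]' loop, threading last_pos and operand_locations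
def pvA_rest (binary : List Int) (n max_gap : Int) : List (List (Option Int)) → Int → List (List Int) → Option (List (List Int))
  | [], _, acc => some acc
  | instr :: more, last_pos, acc =>
    let search_limit := min (last_pos + 1 + max_gap) (n - (instr.length : Int) + 1)
    match pvA_findK binary instr (PySem.List.pyRange (last_pos + 1) search_limit 1) with
    | some (k, ls) => pvA_rest binary n max_gap more k (acc ++ [ls])
    | none => none

-- A's outer 'while i <= n - plen' loop; fuel counts the remaining iterations
def pvA_outer (binary : List Int) (first : List (Option Int)) (restInstrs : List (List (Option Int))) (n max_gap : Int) : Nat → Int → Option Int × Option (List (List Int))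
  | 0, _ => (none, none)
  | fuel + 1, i =>
    let r := pvA_scan binary first i
    if r.2 then
      match pvA_rest binary n max_gap restInstrs i [r.1] with
      | some ops => (some i, some ops)
      | none => pvA_outer binary first restInstrs n max_gap fuel (i + 1)
    else pvA_outer binary first restInstrs n max_gap fuel (i + 1)

def search_pattern_operand_locations (binary : List Int) (pattern_instrs : List (List (Option Int))) (max_gap : Int) : Option Int × Option (List (List Int)) :=
  match pattern_instrs with
  | [] => (none, none)  -- Python raises IndexError here; excluded by Pre_
  | first :: rest =>
    let n : Int := binary.length
    let plen : Int := first.length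
    pvA_outer binary first rest n max_gap (n - plen + 1).toNat 0

-- ===== PORT B =====
-- Source B's match_at: wildcard locations if instr matches at pos, else none
def pvB_matchAt (binary : List Int) : List (Option Int) → Int → Option (List Int)
  | [], _ => some []
  | none :: rest, pos => (pvB_matchAt binary rest (pos + 1)).map (fun ls => pos :: ls)
  | some v :: rest, pos =>
    if PySem.List.pyGet? binary pos = some v then pvB_matchAt binary rest (pos + 1) else none

-- Source B's match_from: greedily place each instruction at the first matching position of its window
def pvB_matchFrom (binary : List Int) (n max_gap : Int) : List (List (Option Int)) → Int → Int → Option (List (List Int))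
  | [], _, _ => some []
  | instr :: more, lo, hi =>
    match (PySem.List.pyRange lo (min hi (n - (instr.length : Int) + 1)) 1).findSome?
            (fun k => (pvB_matchAt binary instr k).map (fun ls => (k, ls))) with
    | none => none
    | some (k, ls) =>
      match pvB_matchFrom binary n max_gap more (k + 1) (k + 1 + max_gap) with
      | none => none
      | some tail => some (ls :: tail)

-- Source B's 'for start in range(n - plen + 1)' driver
def pvB_driver (binary : List Int) (n max_gap : Int) (pattern : List (List (Option Int))) : List Int → Option Int × Option (List (List Int))
  | [] => (none, none)
  | s :: ss =>
    match pvB_matchFrom binary n max_gap pattern s (s + 1) with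
    | some ops => (some s, some ops)
    | none => pvB_driver binary n max_gap pattern ss

def search_pattern_operand_locations_alt (binary : List Int) (pattern_instrs : List (List (Option Int))) (max_gap : Int) : Option Int × Option (List (List Int)) :=
  match pattern_instrs with
  | [] => (none, none)  -- Source B raises IndexError here too; excluded by Pre_
  | first :: _ =>
    let n : Int := binary.length
    pvB_driver binary n max_gap pattern_instrs (PySem.List.pyRange 0 (n - (first.length : Int) + 1) 1)

-- ===== PRECONDITION & SPEC =====
-- Python A evaluates pattern_instrs[0] and raises IndexError on an empty pattern list (B does too);
-- everywhere else every index A touches is in range, so A is total there.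
def Pre_search_pattern_operand_locations (binary : List Int) (pattern_instrs : List (List (Option Int))) (max_gap : Int) : Prop := pattern_instrs ≠ []
instance (binary : List Int) (pattern_instrs : List (List (Option Int))) (max_gap : Int) : Decidable (Pre_search_pattern_operand_locations binary pattern_instrs max_gap) := by unfold Pre_search_pattern_operand_locations; infer_instance

def pvWitness_search_pattern_operand_locations : List Int × List (List (Option Int)) × Int := ([1, 2, 0, 3], [[some 1, none], [some 3]], 2)

def Spec_search_pattern_operand_locations (binary : List Int) (pattern_instrs : List (List (Option Int))) (max_gap : Int) (out : Option Int × Option (List (List Int))) : Prop := out = search_pattern_operand_locations_alt binary pattern_instrs max_gap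
instance (binary : List Int) (pattern_instrs : List (List (Option Int))) (max_gap : Int) (out : Option Int × Option (List (List Int))) : Decidable (Spec_search_pattern_operand_locations binary pattern_instrs max_gap out) := by unfold Spec_search_pattern_operand_locations; infer_instance

-- ===== CLAIM (what is proved, stated in full; the proofs are below) =====
def Claim_equal_search_pattern_operand_locations : Prop := ∀ (binary : List Int) (pattern_instrs : List (List (Option Int))) (max_gap : Int), Dom_search_pattern_operand_locations binary pattern_instrs max_gap → Pre_search_pattern_operand_locations binary pattern_instrs max_gap → Spec_search_pattern_operand_locations binary pattern_instrs max_gap (search_pattern_operand_locations binary pattern_instrs max_gap)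

-- ===== LEMMAS AND PROOFS =====

theorem pv_scan_matchAt (binary : List Int) (instr : List (Option Int)) (pos : Int) :
    pvB_matchAt binary instr pos =
      (if (pvA_scan binary instr pos).2 then some (pvA_scan binary instr pos).1 else none) := by
  induction instr generalizing pos with
  | nil => simp [pvA_scan, pvB_matchAt]
  | cons c rest ih =>
    cases c with
    | none =>
      simp only [pvA_scan, pvB_matchAt, ih]
      cases h : (pvA_scan binary rest (pos + 1)).2 <;> simp [h]
    | some v =>
      by_cases h : PySem.List.pyGet? binary pos = some v <;>
        simp [pvA_scan, pvB_matchAt, h, ih]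

theorem pv_findK_findSome (binary : List Int) (instr : List (Option Int)) (ks : List Int) :
    pvA_findK binary instr ks =
      ks.findSome? (fun k => (pvB_matchAt binary instr k).map (fun ls => (k, ls))) := by
  have hf : ∀ k : Int, (pvB_matchAt binary instr k).map (fun ls => (k, ls)) =
      (if (pvA_scan binary instr k).2 then some (k, (pvA_scan binary instr k).1) else none) := by
    intro k
    rw [pv_scan_matchAt]
    cases (pvA_scan binary instr k).2 <;> simp
  induction ks with
  | nil => simp [pvA_findK]
  | cons k ks ih =>
    simp only [pvA_findK, List.findSome?_cons, hf, ih]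
    cases h : (pvA_scan binary instr k).2 <;> simp [h]

theorem pv_rest_matchFrom (binary : List Int) (n max_gap : Int)
    (instrs : List (List (Option Int))) (last_pos : Int) (acc : List (List Int)) :
    pvA_rest binary n max_gap instrs last_pos acc =
      (pvB_matchFrom binary n max_gap instrs (last_pos + 1) (last_pos + 1 + max_gap)).map
        (fun t => acc ++ t) := by
  induction instrs generalizing last_pos acc with
  | nil => simp [pvA_rest, pvB_matchFrom]
  | cons instr more ih =>
    simp only [pvA_rest, pvB_matchFrom, pv_findK_findSome]
    cases hf : (PySem.List.pyRange (last_pos + 1) (min (last_pos + 1 + max_gap) (n - (instr.length : Int) + 1)) 1).findSome?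
        (fun k => (pvB_matchAt binary instr k).map (fun ls => (k, ls))) with
    | none => simp
    | some kl =>
      obtain ⟨k, ls⟩ := kl
      simp only [ih k (acc ++ [ls])]
      cases pvB_matchFrom binary n max_gap more (k + 1) (k + 1 + max_gap) with
      | none => simp
      | some tail => simp

theorem pv_matchFrom_anchor (binary : List Int) (n max_gap : Int)
    (first : List (Option Int)) (rest : List (List (Option Int))) (s : Int)
    (hs : s + 1 ≤ n - (first.length : Int) + 1) :
    pvB_matchFrom binary n max_gap (first :: rest) s (s + 1) =
      (if (pvA_scan binary first s).2 then
        pvA_rest binary n max_gap rest s [(pvA_scan binary first s).1] else none) := by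
  have hmin : min (s + 1) (n - (first.length : Int) + 1) = s + 1 := min_eq_left hs
  have hr : PySem.List.pyRange s (s + 1) 1 = [s] := by
    rw [PySem.List.pyRange_one]
    norm_num
  simp only [pvB_matchFrom, hmin, hr, List.findSome?_cons, pv_scan_matchAt]
  cases h : (pvA_scan binary first s).2 with
  | false => simp [h]
  | true =>
    simp only [h, if_true, Option.map_some, pv_rest_matchFrom]
    cases pvB_matchFrom binary n max_gap rest (s + 1) (s + 1 + max_gap) with
    | none => simp
    | some tail => simp

theorem pv_outer_driver (binary : List Int) (first : List (Option Int))
    (rest : List (List (Option Int))) (n max_gap : Int) (fuel : Nat) (i : Int)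
    (hn : n = (binary.length : Int))
    (hfuel : fuel = (n - (first.length : Int) + 1 - i).toNat) :
    pvA_outer binary first rest n max_gap fuel i =
      pvB_driver binary n max_gap (first :: rest) (PySem.List.pyRange i (n - (first.length : Int) + 1) 1) := by
  induction fuel generalizing i with
  | zero =>
    have : n - (first.length : Int) + 1 ≤ i := by omega
    have hr : PySem.List.pyRange i (n - (first.length : Int) + 1) 1 = [] := by
      rw [PySem.List.pyRange_one]
      have : (n - (first.length : Int) + 1 - i).toNat = 0 := by omega
      simp [this]
    simp [pvA_outer, hr, pvB_driver]
  | succ fuel ih =>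
    have hi : i < n - (first.length : Int) + 1 := by omega
    have hr : PySem.List.pyRange i (n - (first.length : Int) + 1) 1 =
        i :: PySem.List.pyRange (i + 1) (n - (first.length : Int) + 1) 1 :=
      PySem.List.pyRange_one_cons hi
    rw [hr]
    simp only [pvA_outer, pvB_driver,
      pv_matchFrom_anchor binary n max_gap first rest i (by omega)]
    cases h : (pvA_scan binary first i).2 with
    | false => simp only [h, Bool.false_eq_true, if_false, reduceIte]; exact ih (i + 1) (by omega)
    | true =>
      simp only [h, if_true]
      cases pvA_rest binary n max_gap rest i [(pvA_scan binary first i).1] with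
      | none => exact ih (i + 1) (by omega)
      | some ops => rfl

-- ===== VERDICT (by name: the statement is the Claim_ definition above) =====
theorem search_pattern_operand_locations_spec : Claim_equal_search_pattern_operand_locations := by
  intro binary pattern_instrs max_gap _hdom hpre
  unfold Spec_search_pattern_operand_locations
  cases pattern_instrs with
  | nil => exact absurd rfl hpre
  | cons first rest =>
    unfold search_pattern_operand_locations search_pattern_operand_locations_alt
    exact pv_outer_driver binary first rest (binary.length : Int) max_gap _ 0 rfl (by omega)
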